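-- pv_equiv track=rewrite | github.com/rolypangilinan/HP-60_80-CLONE-FC1-PRO-1-9 | WORKING 16B 1D 1A12/arduino_bridge.py | parse_serial_message
-- ===== SOURCE A (Python) =====
-- def parse_serial_message(message):
--     """
--     Parse Arduino serial message.
--     Expected format: P1START, P1STOP, P2START, ... P9STOP
--     Returns (process_no, action) or (None, None) if invalid.
--     """
--     message = message.strip().upper()
--
--     if not message.startswith("P"):
--         return None, None
--
--     # Try to extract process number and action
--     for i in range(1, 10):
--         prefix = f"P{i}"
--         if message.startswith(prefix):
--             remainder = message[len(prefix):]
--             if remainder == "START":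
--                 return i, "start"
--             elif remainder == "STOP":
--                 return i, "stop"
--
--     return None, None
-- ===== SOURCE B (Python) =====
-- def parse_serial_message(message):
--     """Positional parse: P + one digit 1-9 + START/STOP, no loop over prefixes."""
--     message = message.strip().upper()
--     if not message.startswith("P"):
--         return None, None
--     if len(message) >= 2 and message[1] in "123456789":
--         process_no = int(message[1])
--         remainder = message[2:]
--         if remainder == "START":
--             return process_no, "start"
--         if remainder == "STOP":
--             return process_no, "stop"
--     return None, None
-- ===== Notes on version B (the rewrite author's own statement) =====
-- stated objective: simpler
-- what changed: Replaces A's 9-iteration loop that re-tests a two-character prefix and re-slices the message per iteration with one positional read of the digit at index 1 followed by a single remainder comparison.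
import Mathlib
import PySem

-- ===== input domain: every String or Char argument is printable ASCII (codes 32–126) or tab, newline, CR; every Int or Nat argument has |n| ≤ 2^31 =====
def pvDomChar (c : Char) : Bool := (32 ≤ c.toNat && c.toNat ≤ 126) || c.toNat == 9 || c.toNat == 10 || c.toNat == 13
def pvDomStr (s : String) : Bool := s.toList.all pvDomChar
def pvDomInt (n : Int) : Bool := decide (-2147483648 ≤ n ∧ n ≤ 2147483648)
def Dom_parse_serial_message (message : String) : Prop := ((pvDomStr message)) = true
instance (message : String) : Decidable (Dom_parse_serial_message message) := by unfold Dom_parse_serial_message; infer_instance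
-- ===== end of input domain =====

-- B replaces A's 9-iteration prefix-matching loop by one positional extraction of the digit; objective: simpler.

-- ===== PORT A =====
-- the for-loop over range(1, 10) with early return
def pvLoopA (m : List Char) : List Int → Option Int × Option String
  | [] => (none, none)
  | i :: rest =>
    let pre := 'P' :: PySem.Int.toChars i          -- the prefix "P" + str(i)
    if PySem.Chars.startswith m pre then
      let remainder := PySem.List.slice m (some (pre.length : Int)) none   -- message[len(prefix):]
      if remainder = "START".toList then (some i, some "start")
      else if remainder = "STOP".toList then (some i, some "stop")
      else pvLoopA m rest
    else pvLoopA m rest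

def parse_serial_message (message : String) : Option Int × Option String :=
  let m := PySem.Chars.upper (PySem.Chars.strip message.toList)
  if ¬ (PySem.Chars.startswith m ['P']) then (none, none)
  else pvLoopA m (PySem.List.pyRange 1 10 1)

-- ===== PORT B =====
def pvBCore (m : List Char) : Option Int × Option String :=
  if ¬ (PySem.Chars.startswith m ['P']) then (none, none)
  else
    match m with
    | _ :: d :: rest =>                            -- len(message) >= 2; d = message[1], rest = message[2:]
      if "123456789".toList.contains d then
        let pno : Int := (PySem.Int.ofChars? [d]).getD 0   -- int(message[1]); the digit guard makes getD unreachable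
        if rest = "START".toList then (some pno, some "start")
        else if rest = "STOP".toList then (some pno, some "stop")
        else (none, none)
      else (none, none)
    | _ => (none, none)

def parse_serial_message_alt (message : String) : Option Int × Option String :=
  pvBCore (PySem.Chars.upper (PySem.Chars.strip message.toList))

-- ===== PRECONDITION & SPEC =====
def Spec_parse_serial_message (message : String) (out : Option Int × Option String) : Prop := out = parse_serial_message_alt message
instance (message : String) (out : Option Int × Option String) : Decidable (Spec_parse_serial_message message out) := by unfold Spec_parse_serial_message; infer_instance

-- ===== CLAIM (what is proved, stated in full; the proofs are below) =====
def Claim_equal_parse_serial_message : Prop := ∀ (message : String), Dom_parse_serial_message message → Spec_parse_serial_message message (parse_serial_message message)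

-- ===== LEMMAS AND PROOFS =====
lemma pvRange19 : PySem.List.pyRange 1 10 1 = [1,2,3,4,5,6,7,8,9] := by decide

lemma pvCore_eq (m : List Char) :
    (if ¬ (PySem.Chars.startswith m ['P']) then (none, none)
     else pvLoopA m (PySem.List.pyRange 1 10 1)) = pvBCore m := by
  by_cases hP : PySem.Chars.startswith m ['P'] = true
  · rw [PySem.Chars.startswith_iff] at hP
    obtain ⟨s, rfl⟩ := hP
    cases s with
    | nil => decide
    | cons d rest =>
      have t1 : PySem.Int.toChars 1 = ['1'] := by decide
      have t2 : PySem.Int.toChars 2 = ['2'] := by decide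
      have t3 : PySem.Int.toChars 3 = ['3'] := by decide
      have t4 : PySem.Int.toChars 4 = ['4'] := by decide
      have t5 : PySem.Int.toChars 5 = ['5'] := by decide
      have t6 : PySem.Int.toChars 6 = ['6'] := by decide
      have t7 : PySem.Int.toChars 7 = ['7'] := by decide
      have t8 : PySem.Int.toChars 8 = ['8'] := by decide
      have t9 : PySem.Int.toChars 9 = ['9'] := by decide
      have p1 : (PySem.Int.ofChars? ['1']).getD 0 = 1 := by decide
      have p2 : (PySem.Int.ofChars? ['2']).getD 0 = 2 := by decide
      have p3 : (PySem.Int.ofChars? ['3']).getD 0 = 3 := by decide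
      have p4 : (PySem.Int.ofChars? ['4']).getD 0 = 4 := by decide
      have p5 : (PySem.Int.ofChars? ['5']).getD 0 = 5 := by decide
      have p6 : (PySem.Int.ofChars? ['6']).getD 0 = 6 := by decide
      have p7 : (PySem.Int.ofChars? ['7']).getD 0 = 7 := by decide
      have p8 : (PySem.Int.ofChars? ['8']).getD 0 = 8 := by decide
      have p9 : (PySem.Int.ofChars? ['9']).getD 0 = 9 := by decide
      by_cases hmem : d ∈ "123456789".toList
      · have hl : ("123456789".toList) = ['1','2','3','4','5','6','7','8','9'] := by decide
        rw [hl] at hmem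
        simp only [List.mem_cons, List.not_mem_nil, or_false] at hmem
        rcases hmem with rfl|rfl|rfl|rfl|rfl|rfl|rfl|rfl|rfl <;>
          simp [pvBCore, pvLoopA, pvRange19, t1, t2, t3, t4, t5, t6, t7, t8, t9,
                p1, p2, p3, p4, p5, p6, p7, p8, p9,
                PySem.Chars.startswith_iff, List.cons_prefix_cons, PySem.List.slice_from]
      · have hne : ∀ c, c ∈ "123456789".toList → ¬ (c = d) := fun c hc h => hmem (h ▸ hc)
        have h1 := hne '1' (by decide); have h2 := hne '2' (by decide)
        have h3 := hne '3' (by decide); have h4 := hne '4' (by decide)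
        have h5 := hne '5' (by decide); have h6 := hne '6' (by decide)
        have h7 := hne '7' (by decide); have h8 := hne '8' (by decide)
        have h9 := hne '9' (by decide)
        simp [pvBCore, pvLoopA, pvRange19, t1, t2, t3, t4, t5, t6, t7, t8, t9,
              PySem.Chars.startswith_iff, List.cons_prefix_cons,
              h1, h2, h3, h4, h5, h6, h7, h8, h9]
        rintro (rfl | rfl | rfl | rfl | rfl | rfl | rfl | rfl | rfl) <;>
          exact absurd rfl (hne _ (by decide))
  · simp [pvBCore, hP]

-- ===== VERDICT (by name: the statement is the Claim_ definition above) =====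
theorem parse_serial_message_spec : Claim_equal_parse_serial_message := by
  intro message _
  unfold Spec_parse_serial_message parse_serial_message parse_serial_message_alt
  exact pvCore_eq _
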